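-- pv_equiv track=rewrite | github.com/satyanpadhy/Project_CodeVisualizer | visualizer.py | _group_related_functions
-- ===== SOURCE A (Python) =====
-- from typing import Dict, List, Optional, Set
--
-- def _group_related_functions(metadata: Dict[str, List[str]]) -> List[Set[str]]:
--     """Group related functions based on their dependencies."""
--     groups: List[Set[str]] = []
--     processed = set()
--
--     def get_related_functions(func: str, related: Optional[Set[str]] = None) -> Set[str]:
--         if related is None:
--             related = set()
--         related.add(func)
--
--         # Add dependencies
--         for dep in metadata.get(func, []):
--             if dep not in related and dep in metadata:
--                 get_related_functions(dep, related)
--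
--         # Add functions that depend on this one
--         for f, deps in metadata.items():
--             if func in deps and f not in related and f in metadata:
--                 get_related_functions(f, related)
--
--         return related
--
--     # Process all functions
--     for func in metadata:
--         if func not in processed:
--             related = get_related_functions(func)
--             groups.append(related)
--             processed.update(related)
--
--     return groups
-- ===== SOURCE B (Python) =====
-- from typing import Dict, List, Set
--
-- def _group_related_functions(metadata: Dict[str, List[str]]) -> List[Set[str]]:
--     """Group related functions into connected dependency components.
--
--     Precomputes a reverse-adjacency map once, then finds each component with an
--     iterative stack DFS: O(V + E) instead of A's O(V * (V + E)) rescan per node.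
--     """
--     # reverse adjacency: rev[d] = functions that depend on d (in metadata order)
--     rev: Dict[str, List[str]] = {f: [] for f in metadata}
--     for f, deps in metadata.items():
--         for dep in deps:
--             if dep in rev and f not in rev[dep]:
--                 rev[dep].append(f)
--
--     groups: List[Set[str]] = []
--     processed = set()
--     for func in metadata:
--         if func in processed:
--             continue
--         comp = set()
--         stack = [func]
--         while stack:
--             u = stack.pop()
--             if u in comp:
--                 continue
--             comp.add(u)
--             nbrs = [d for d in metadata[u] if d in rev] + rev[u]
--             stack.extend(reversed(nbrs))
--         groups.append(comp)
--         processed.update(comp)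
--     return groups
-- ===== Notes on version B (the rewrite author's own statement) =====
-- stated objective: faster
-- what changed: Replaces the recursive DFS that rescans every metadata item on every visited node (to find dependents) with a reverse-adjacency map built once plus an iterative stack DFS.
import Mathlib
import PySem

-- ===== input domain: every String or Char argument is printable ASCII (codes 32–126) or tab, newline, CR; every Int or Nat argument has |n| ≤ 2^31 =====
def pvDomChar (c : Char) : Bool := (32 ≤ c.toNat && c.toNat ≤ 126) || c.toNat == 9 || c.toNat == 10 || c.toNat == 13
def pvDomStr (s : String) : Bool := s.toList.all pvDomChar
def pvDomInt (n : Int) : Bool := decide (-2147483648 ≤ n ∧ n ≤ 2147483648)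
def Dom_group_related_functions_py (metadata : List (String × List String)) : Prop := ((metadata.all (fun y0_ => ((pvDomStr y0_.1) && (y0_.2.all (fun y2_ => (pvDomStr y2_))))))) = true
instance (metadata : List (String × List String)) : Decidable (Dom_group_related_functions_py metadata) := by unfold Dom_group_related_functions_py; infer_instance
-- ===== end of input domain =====

-- B replaces A's per-node rescan of all metadata items (to find dependents) by a reverse-adjacency
-- map built once plus an iterative stack DFS; objective: faster (O(V+E) instead of O(V*(V+E))).

-- Termination helpers, cited by the ports' `decreasing_by` (proof-only lemmas about the measure).
theorem pv_contains_add (s : PySem.Set String) (x y : String) :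
    PySem.Set.contains (PySem.Set.add s x) y = (PySem.Set.contains s y || (y == x)) := by
  simp only [PySem.Set.contains, PySem.Set.add]
  by_cases h : List.contains s x
  · simp only [h, if_true]
    by_cases h2 : y = x
    · subst h2; simp_all
    · simp [h2]
  · simp only [Bool.not_eq_true] at h
    simp only [h, Bool.false_eq_true, if_false]
    simp [beq_eq_decide]

theorem pv_filter_length_lt (ks : List String) (s : PySem.Set String) (u : String)
    (hu : u ∈ ks) (hnu : PySem.Set.contains s u = false) :
    (ks.filter (fun k => !PySem.Set.contains (PySem.Set.add s u) k)).length <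
      (ks.filter (fun k => !PySem.Set.contains s k)).length := by
  have hsub : (ks.filter (fun k => !PySem.Set.contains (PySem.Set.add s u) k)).Sublist
      (ks.filter (fun k => !PySem.Set.contains s k)) := by
    apply List.monotone_filter_right
    intro a ha
    simp only [Bool.not_eq_eq_eq_not, Bool.not_true, pv_contains_add, Bool.or_eq_false_iff] at ha ⊢
    exact ha.1
  refine Nat.lt_of_le_of_ne hsub.length_le (fun he => ?_)
  have heq := hsub.eq_of_length he
  have hmem : u ∈ ks.filter (fun k => !PySem.Set.contains s k) := by
    rw [List.mem_filter]
    exact ⟨hu, by simp only [hnu, Bool.not_false]⟩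
  rw [← heq] at hmem
  rw [List.mem_filter] at hmem
  have hctu : PySem.Set.contains (PySem.Set.add s u) u = true := by
    rw [pv_contains_add]; simp
  simp [hctu] at hmem

-- ===== PORT A =====
-- Literal transliteration of A's recursive helper `get_related_functions`.  The `fuel`
-- argument is only a totality guard (A's recursion has no structural measure); the caller
-- passes `d.items.length + 1`, which the proofs show is never exhausted.
def pvA_getRelated (d : PySem.Dict String (List String)) :
    Nat → String → PySem.Set String → PySem.Set String
  | 0, _, related => related
  | fuel+1, func, related =>
    -- related.add(func)
    let related := PySem.Set.add related func
    -- for dep in metadata.get(func, []): if dep not in related and dep in metadata: recurse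
    let related := (d.getD func []).foldl
      (fun r dep => if !PySem.Set.contains r dep && d.contains dep then pvA_getRelated d fuel dep r else r)
      related
    -- for f, deps in metadata.items(): if func in deps and f not in related and f in metadata: recurse
    d.items.foldl
      (fun r p => if p.2.contains func && !PySem.Set.contains r p.1 && d.contains p.1 then pvA_getRelated d fuel p.1 r else r)
      related

def group_related_functions_py (metadata : List (String × List String)) : List (List String) :=
  let d := PySem.Dict.ofList metadata
  -- groups = []; processed = set(); for func in metadata: …
  (d.keys.foldl
    (fun (st : List (List String) × PySem.Set String) func =>
      if !PySem.Set.contains st.2 func then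
        let related := pvA_getRelated d (d.items.length + 1) func PySem.Set.empty
        (st.1 ++ [related], PySem.Set.update st.2 related)
      else st)
    ([], PySem.Set.empty)).1

-- ===== PORT B =====
-- rev[dep].append(f) loop for one item (f, deps)  (inner `for dep in deps` loop of Source B)
def pvB_addEdges (f : String) (deps : List String)
    (r : PySem.Dict String (List String)) : PySem.Dict String (List String) :=
  deps.foldl
    (fun r dep => if r.contains dep && !((r.getD dep []).contains f) then r.modify dep [] (fun l => l ++ [f]) else r)
    r

-- rev = {f: [] for f in metadata}; for f, deps in metadata.items(): for dep in deps: …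
def pvB_rev (d : PySem.Dict String (List String)) : PySem.Dict String (List String) :=
  d.items.foldl (fun r p => pvB_addEdges p.1 p.2 r)
    (d.keys.foldl (fun r f => r.insert f ([] : List String)) PySem.Dict.empty)

-- the `while stack:` loop of Source B; stack head = Python list end (pop/extend site).
-- `stack.extend(reversed(nbrs))` followed by repeated `pop()` yields nbrs in order, i.e. `nbrs ++ rest`.
def pvB_dfs (d rev : PySem.Dict String (List String)) :
    List String → PySem.Set String → PySem.Set String
  | [], comp => comp
  | u :: rest, comp =>
    if h : PySem.Set.contains comp u = true then pvB_dfs d rev rest comp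
    else
      let nbrs := (d.getD u []).filter (fun x => d.contains x) ++ rev.getD u []
      pvB_dfs d rev (nbrs ++ rest) (PySem.Set.add comp u)
  termination_by stack comp =>
    ((((d.keys ++ rev.keys).filter (fun k => !PySem.Set.contains comp k)).length, stack.length) : Nat × Nat)
  decreasing_by
  · exact Prod.Lex.right _ (by simp)
  · by_cases hu : u ∈ d.keys ++ rev.keys
    · exact Prod.Lex.left _ _ (pv_filter_length_lt _ _ _ hu (Bool.eq_false_iff.mpr h))
    · have h1 : d.contains u = false := by
        rw [Bool.eq_false_iff]; intro hc
        exact hu (List.mem_append_left _ ((PySem.Dict.contains_iff_mem_keys d u).mp hc))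
      have h2 : rev.contains u = false := by
        rw [Bool.eq_false_iff]; intro hc
        exact hu (List.mem_append_right _ ((PySem.Dict.contains_iff_mem_keys rev u).mp hc))
      have hnb : (d.getD u []).filter (fun x => d.contains x) ++ rev.getD u [] = ([] : List String) := by
        rw [PySem.Dict.getD_of_not_contains d [] h1, PySem.Dict.getD_of_not_contains rev [] h2]
        simp
      rw [hnb, List.nil_append]
      have hsame : ((d.keys ++ rev.keys).filter (fun k => !PySem.Set.contains (PySem.Set.add comp u) k)).length
          = ((d.keys ++ rev.keys).filter (fun k => !PySem.Set.contains comp k)).length := by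
        congr 1
        apply List.filter_congr
        intro k hk
        have hne : k ≠ u := fun he => hu (he ▸ hk)
        rw [pv_contains_add]
        simp [hne]
      rw [hsame]
      exact Prod.Lex.right _ (by simp)

def group_related_functions_py_alt (metadata : List (String × List String)) : List (List String) :=
  let d := PySem.Dict.ofList metadata
  let rev := pvB_rev d
  (d.keys.foldl
    (fun (st : List (List String) × PySem.Set String) func =>
      if PySem.Set.contains st.2 func then st
      else
        let comp := pvB_dfs d rev [func] PySem.Set.empty
        (st.1 ++ [comp], PySem.Set.update st.2 comp))
    ([], PySem.Set.empty)).1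

-- ===== PRECONDITION & SPEC =====
def Spec_group_related_functions_py (metadata : List (String × List String)) (out : List (List String)) : Prop := out = group_related_functions_py_alt metadata
instance (metadata : List (String × List String)) (out : List (List String)) : Decidable (Spec_group_related_functions_py metadata out) := by unfold Spec_group_related_functions_py; infer_instance

-- ===== CLAIM (what is proved, stated in full; the proofs are below) =====
def Claim_equal_group_related_functions_py : Prop := ∀ (metadata : List (String × List String)), Dom_group_related_functions_py metadata → Spec_group_related_functions_py metadata (group_related_functions_py metadata)

-- ===== LEMMAS AND PROOFS =====

theorem pv_filter_length_le (ks : List String) (s s' : PySem.Set String)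
    (h : ∀ k, PySem.Set.contains s k = true → PySem.Set.contains s' k = true) :
    (ks.filter (fun k => !PySem.Set.contains s' k)).length ≤ (ks.filter (fun k => !PySem.Set.contains s k)).length := by
  apply List.Sublist.length_le
  apply List.monotone_filter_right
  intro a ha
  simp only [Bool.not_eq_true'] at ha ⊢
  cases hc : PySem.Set.contains s a with
  | false => rfl
  | true => rw [h a hc] at ha; exact ha

-- dependents of u: the functions whose dependency list mentions u, in metadata order
def pvDeps (d : PySem.Dict String (List String)) (u : String) : List String :=
  (d.items.filter (fun p => p.2.contains u)).map (·.1)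

-- combined neighbour list of u in the (undirected) dependency graph
def pvNb (d : PySem.Dict String (List String)) (u : String) : List String :=
  (d.getD u []).filter (fun x => d.contains x) ++ pvDeps d u

-- reference DFS over a pending list: skips visited and non-key nodes, else visits and prepends neighbours
def pvDfsRef (keys : List String) (nbrs : String → List String) :
    List String → PySem.Set String → PySem.Set String
  | [], s => s
  | u :: rest, s =>
    if h : (PySem.Set.contains s u || !keys.contains u) = true then pvDfsRef keys nbrs rest s
    else pvDfsRef keys nbrs (nbrs u ++ rest) (PySem.Set.add s u)
  termination_by pending s =>
    (((keys.filter (fun k => !PySem.Set.contains s k)).length, pending.length) : Nat × Nat)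
  decreasing_by
  · exact Prod.Lex.right _ (by simp)
  · simp only [Bool.or_eq_true, not_or, Bool.not_eq_true, Bool.not_eq_false] at h
    exact Prod.Lex.left _ _
      (pv_filter_length_lt _ _ _ (by simpa [List.contains_iff_mem] using h.2) h.1)

theorem pv_dcontains_eq (d : PySem.Dict String (List String)) (x : String) :
    d.contains x = d.keys.contains x := by
  rw [PySem.Dict.contains_eq_decide_mem_keys]
  simp [List.contains_iff_mem]

def pvUnvis (d : PySem.Dict String (List String)) (s : PySem.Set String) : Nat :=
  (d.keys.filter (fun k => !PySem.Set.contains s k)).length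

theorem pv_ref_mono (keys : List String) (nbrs : String → List String) :
    ∀ (pending : List String) (s : PySem.Set String) (k : String),
      PySem.Set.contains s k = true → PySem.Set.contains (pvDfsRef keys nbrs pending s) k = true := by
  intro pending s
  induction pending, s using pvDfsRef.induct keys nbrs with
  | case1 s => intro k hk; simpa [pvDfsRef] using hk
  | case2 u rest s h ih =>
    intro k hk
    rw [pvDfsRef, dif_pos h]
    exact ih k hk
  | case3 u rest s h ih =>
    intro k hk
    rw [pvDfsRef, dif_neg h]
    exact ih k (by rw [pv_contains_add, hk]; rfl)

theorem pv_ref_append (keys : List String) (nbrs : String → List String) :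
    ∀ (l1 : List String) (s : PySem.Set String) (l2 : List String),
      pvDfsRef keys nbrs (l1 ++ l2) s = pvDfsRef keys nbrs l2 (pvDfsRef keys nbrs l1 s) := by
  intro l1 s
  induction l1, s using pvDfsRef.induct keys nbrs with
  | case1 s => intro l2; simp [pvDfsRef]
  | case2 u rest s h ih =>
    intro l2
    rw [List.cons_append, pvDfsRef, dif_pos h, ih l2, pvDfsRef, dif_pos h]
  | case3 u rest s h ih =>
    intro l2
    rw [List.cons_append, pvDfsRef, dif_neg h, ← List.append_assoc, ih l2]
    conv_rhs => rw [pvDfsRef, dif_neg h]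

theorem pv_ref_dropfilter (keys : List String) (nbrs : String → List String) :
    ∀ (l t : List String) (s : PySem.Set String),
      pvDfsRef keys nbrs (l.filter (fun x => keys.contains x) ++ t) s = pvDfsRef keys nbrs (l ++ t) s := by
  intro l t
  induction l with
  | nil => intro s; rfl
  | cons x l' ih =>
    intro s
    by_cases hx : keys.contains x = true
    · rw [List.filter_cons_of_pos (by simpa using hx), List.cons_append, List.cons_append]
      by_cases hs : (PySem.Set.contains s x || !keys.contains x) = true
      · rw [pvDfsRef, dif_pos hs, pvDfsRef, dif_pos hs]
        exact ih s
      · rw [pvDfsRef, dif_neg hs, pvDfsRef, dif_neg hs,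
            pv_ref_append keys nbrs (nbrs x) _ _, pv_ref_append keys nbrs (nbrs x) _ _]
        exact ih _
    · rw [List.filter_cons_of_neg (by simpa using hx), List.cons_append]
      rw [pvDfsRef, dif_pos (by rw [Bool.not_eq_true] at hx; rw [hx]; simp)]
      exact ih s

theorem pv_foldA (d : PySem.Dict String (List String)) (fuel : Nat)
    (hrec : ∀ u s, d.contains u = true → PySem.Set.contains s u = false → pvUnvis d s < fuel →
      pvA_getRelated d fuel u s = pvDfsRef d.keys (pvNb d) [u] s) :
    ∀ (l : List String) (s : PySem.Set String), pvUnvis d s < fuel →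
      l.foldl (fun r dep => if !PySem.Set.contains r dep && d.contains dep then pvA_getRelated d fuel dep r else r) s
        = pvDfsRef d.keys (pvNb d) l s := by
  intro l
  induction l with
  | nil => intro s _; rw [List.foldl_nil, pvDfsRef]
  | cons x l' ih =>
    intro s hlt
    rw [List.foldl_cons]
    by_cases hcx : PySem.Set.contains s x = true
    · rw [if_neg (by rw [hcx]; simp)]
      rw [pvDfsRef, dif_pos (by rw [hcx]; rfl)]
      exact ih s hlt
    · rw [Bool.not_eq_true] at hcx
      by_cases hdx : d.contains x = true
      · rw [if_pos (by rw [hcx, hdx]; rfl)]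
        rw [hrec x s hdx hcx hlt]
        rw [show (x :: l') = [x] ++ l' from rfl, pv_ref_append]
        refine ih _ ?_
        calc pvUnvis d (pvDfsRef d.keys (pvNb d) [x] s)
            ≤ pvUnvis d s := pv_filter_length_le _ _ _ (fun k hk => pv_ref_mono _ _ _ _ _ hk)
          _ < fuel := hlt
      · rw [Bool.not_eq_true] at hdx
        rw [if_neg (by rw [hdx]; simp)]
        rw [pvDfsRef, dif_pos (by rw [← pv_dcontains_eq, hdx]; simp)]
        exact ih s hlt

theorem pv_bridgeA (d : PySem.Dict String (List String)) :
    ∀ (fuel : Nat) (u : String) (s : PySem.Set String),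
      d.contains u = true → PySem.Set.contains s u = false → pvUnvis d s < fuel →
      pvA_getRelated d fuel u s = pvDfsRef d.keys (pvNb d) [u] s := by
  intro fuel
  induction fuel with
  | zero => intro u s _ _ hlt; exact absurd hlt (Nat.not_lt_zero _)
  | succ f IH =>
    intro u s hu hsu hlt
    have huk : u ∈ d.keys := (PySem.Dict.contains_iff_mem_keys d u).mp hu
    have hdec : pvUnvis d (PySem.Set.add s u) < pvUnvis d s := pv_filter_length_lt _ _ _ huk hsu
    have hlt1 : pvUnvis d (PySem.Set.add s u) < f := by
      have : pvUnvis d s < f + 1 := hlt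
      omega
    rw [pvA_getRelated]
    have h1 : (d.getD u []).foldl
        (fun r dep => if !PySem.Set.contains r dep && d.contains dep then pvA_getRelated d f dep r else r)
        (PySem.Set.add s u) = pvDfsRef d.keys (pvNb d) (d.getD u []) (PySem.Set.add s u) :=
      pv_foldA d f IH _ _ hlt1
    rw [h1]
    have hs2 : pvUnvis d (pvDfsRef d.keys (pvNb d) (d.getD u []) (PySem.Set.add s u)) < f :=
      Nat.lt_of_le_of_lt (pv_filter_length_le _ _ _ (fun k hk => pv_ref_mono _ _ _ _ _ hk)) hlt1
    rw [PySem.List.foldl_congr_mem d.items _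
      (fun r (p : String × List String) => if p.2.contains u = true then
        (if (!PySem.Set.contains r p.1 && d.contains p.1) = true then pvA_getRelated d f p.1 r else r) else r)
      _ (fun acc p _ => by beta_reduce; cases p.2.contains u <;> simp)]
    rw [PySem.List.foldl_if_eq_foldl_filter (fun p => p.2.contains u)
      (fun r (p : String × List String) =>
        if (!PySem.Set.contains r p.1 && d.contains p.1) = true then pvA_getRelated d f p.1 r else r)]
    rw [← List.foldl_map (f := fun p : String × List String => p.1)
      (g := fun r dep => if (!PySem.Set.contains r dep && d.contains dep) = true then pvA_getRelated d f dep r else r)]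
    rw [pv_foldA d f IH _ _ hs2]
    rw [← pv_ref_append]
    have hfc : (d.getD u []).filter (fun x => d.keys.contains x)
        = (d.getD u []).filter (fun x => d.contains x) :=
      List.filter_congr (fun x _ => by rw [pv_dcontains_eq])
    have h3 := pv_ref_dropfilter d.keys (pvNb d) (d.getD u []) (pvDeps d u) (PySem.Set.add s u)
    rw [hfc] at h3
    rw [show ((d.items.filter (fun p => p.2.contains u)).map (·.1)) = pvDeps d u from rfl, ← h3]
    rw [pvDfsRef, dif_neg (by rw [hsu]; simp [huk, List.contains_iff_mem])]
    rw [List.append_nil]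
    rfl

def pvDepsOf (l : List (String × List String)) (u : String) : List String :=
  (l.filter (fun p => p.2.contains u)).map (·.1)

theorem pv_revInner (d : PySem.Dict String (List String)) (f : String) :
    ∀ (ds : List String) (r : PySem.Dict String (List String))
      (g0 : String → List String) (seen : String → Bool),
      (∀ k, f ∉ g0 k) → r.keys = d.keys →
      (∀ k, r.getD k [] = g0 k ++ (if k ∈ d.keys ∧ seen k = true then [f] else [])) →
      (pvB_addEdges f ds r).keys = d.keys ∧
        ∀ k, (pvB_addEdges f ds r).getD k [] = g0 k ++ (if k ∈ d.keys ∧ (seen k = true ∨ k ∈ ds) then [f] else []) := by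
  intro ds
  induction ds with
  | nil =>
    intro r g0 seen hf hkeys hg
    refine ⟨hkeys, fun k => ?_⟩
    simp only [pvB_addEdges, List.foldl_nil]
    rw [hg k]
    congr 1
    apply if_congr _ rfl rfl
    simp
  | cons dep ds' ih =>
    intro r g0 seen hf hkeys hg
    simp only [pvB_addEdges, List.foldl_cons]
    -- the state after processing `dep`, with the seen-set extended by `dep`
    have main : ∀ (r1 : PySem.Dict String (List String)),
        r1.keys = d.keys →
        (∀ k, r1.getD k [] = g0 k ++ (if k ∈ d.keys ∧ (seen k || (k == dep)) = true then [f] else [])) →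
        (pvB_addEdges f ds' r1).keys = d.keys ∧
          ∀ k, (pvB_addEdges f ds' r1).getD k [] =
            g0 k ++ (if k ∈ d.keys ∧ (seen k = true ∨ k ∈ dep :: ds') then [f] else []) := by
      intro r1 hkeys1 hg1
      obtain ⟨h1, h2⟩ := ih r1 g0 (fun k => seen k || (k == dep)) hf hkeys1 hg1
      refine ⟨h1, fun k => ?_⟩
      rw [h2 k]
      congr 1
      apply if_congr (and_congr_right fun _ => ?_) rfl rfl
      simp only [Bool.or_eq_true, beq_iff_eq, List.mem_cons]
      tauto
    by_cases hdk : dep ∈ d.keys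
    · have hcont : r.contains dep = true := by
        rw [pv_dcontains_eq, hkeys, List.contains_iff_mem]
        exact hdk
      have hgd := hg dep
      by_cases hsd : seen dep = true
      · have hfin : (r.getD dep []).contains f = true := by
          rw [hgd, if_pos ⟨hdk, hsd⟩, List.contains_iff_mem]
          simp
        rw [if_neg (by rw [hcont, hfin]; simp)]
        refine main r hkeys (fun k => ?_)
        rw [hg k]
        congr 1
        apply if_congr (and_congr_right fun _ => ?_) rfl rfl
        by_cases hkd : k = dep
        · subst hkd; simp [hsd]
        · simp [hkd]
      · rw [Bool.not_eq_true] at hsd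
        have hgde : r.getD dep [] = g0 dep := by
          rw [hgd, if_neg (by rw [hsd]; simp)]
          simp
        have hfin : (r.getD dep []).contains f = false := by
          rw [hgde, ← Bool.not_eq_true, List.contains_iff_mem]
          exact fun hc => absurd hc (hf dep)
        rw [if_pos (by rw [hcont, hfin]; rfl)]
        refine main _ ?_ (fun k => ?_)
        · rw [PySem.Dict.keys_modify, PySem.Dict.keys_insert_of_contains _ _ hcont, hkeys]
        · rw [PySem.Dict.getD_modify]
          by_cases hkd : k = dep
          · subst hkd
            rw [if_pos rfl, hgde, if_pos ⟨hdk, by simp⟩]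
          · rw [if_neg hkd, hg k]
            congr 1
            apply if_congr (and_congr_right fun _ => ?_) rfl rfl
            simp [hkd]
    · have hcont : r.contains dep = false := by
        rw [← Bool.not_eq_true, pv_dcontains_eq, hkeys, List.contains_iff_mem]
        exact hdk
      rw [if_neg (by rw [hcont]; simp)]
      refine main r hkeys (fun k => ?_)
      rw [hg k]
      congr 1
      apply if_congr ?_ rfl rfl
      by_cases hkd : k = dep
      · subst hkd
        constructor <;> (intro h; exact absurd h.1 hdk)
      · simp [hkd]

theorem pv_revOuter (d : PySem.Dict String (List String)) (hnd : d.keys.Nodup) :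
    ∀ (Q P : List (String × List String)) (r : PySem.Dict String (List String)),
      d.items = P ++ Q → r.keys = d.keys →
      (∀ k, r.getD k [] = if k ∈ d.keys then pvDepsOf P k else []) →
      (Q.foldl (fun r p => pvB_addEdges p.1 p.2 r) r).keys = d.keys ∧
        ∀ k, (Q.foldl (fun r p => pvB_addEdges p.1 p.2 r) r).getD k [] =
          if k ∈ d.keys then pvDepsOf (P ++ Q) k else [] := by
  intro Q
  induction Q with
  | nil =>
    intro P r hitems hkeys hg
    refine ⟨hkeys, fun k => ?_⟩
    rw [List.foldl_nil, hg k, List.append_nil]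
  | cons p Q' ih =>
    intro P r hitems hkeys hg
    rw [List.foldl_cons]
    have hkeys_eq : d.keys = d.items.map (·.1) := rfl
    have hp1 : p.1 ∉ P.map (·.1) := by
      have h1 : d.keys.Nodup := hnd
      rw [hkeys_eq, hitems, List.map_append, List.nodup_append] at h1
      intro hc
      exact h1.2.2 p.1 hc p.1 (List.mem_map_of_mem List.mem_cons_self) rfl
    have hf : ∀ k, p.1 ∉ (if k ∈ d.keys then pvDepsOf P k else []) := by
      intro k
      by_cases hk : k ∈ d.keys
      · rw [if_pos hk]
        intro hc
        apply hp1
        simp only [pvDepsOf, List.mem_map] at hc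
        obtain ⟨q, hq, hqe⟩ := hc
        exact hqe ▸ List.mem_map_of_mem (List.mem_of_mem_filter hq)
      · rw [if_neg hk]; simp
    obtain ⟨h1, h2⟩ := pv_revInner d p.1 p.2 r _ (fun _ => false) hf hkeys
      (fun k => by rw [hg k]; simp)
    have hg' : ∀ k, (pvB_addEdges p.1 p.2 r).getD k [] =
        if k ∈ d.keys then pvDepsOf (P ++ [p]) k else [] := by
      intro k
      rw [h2 k]
      have hsplit : pvDepsOf (P ++ [p]) k
          = pvDepsOf P k ++ List.map (fun x => x.1) (List.filter (fun q => q.2.contains k) [p]) := by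
        simp [pvDepsOf, List.filter_append]
      by_cases hk : k ∈ d.keys
      · simp only [if_pos hk]
        by_cases hm : k ∈ p.2
        · rw [if_pos ⟨hk, Or.inr hm⟩, hsplit, List.filter_cons,
            if_pos (List.contains_iff_mem.mpr hm)]
          rfl
        · rw [if_neg (by rintro ⟨-, h | h⟩; exacts [absurd h (by simp), hm h]), hsplit, List.filter_cons,
            if_neg (fun hc => hm (List.contains_iff_mem.mp hc))]
          simp
      · rw [if_neg hk, if_neg (by rintro ⟨h, -⟩; exact hk h)]
        simp only [if_neg hk]
        simp
    obtain ⟨h3, h4⟩ := ih (P ++ [p]) (pvB_addEdges p.1 p.2 r)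
      (by rw [hitems, List.append_assoc]; rfl) h1 hg'
    refine ⟨h3, fun k => ?_⟩
    rw [h4 k, List.append_assoc]
    rfl

theorem pv_rev_spec (d : PySem.Dict String (List String)) (hnd : d.keys.Nodup) :
    (pvB_rev d).keys = d.keys ∧
      ∀ k, (pvB_rev d).getD k [] = if k ∈ d.keys then pvDeps d k else [] := by
  have hitems0 : (d.keys.foldl (fun r f => r.insert f ([] : List String)) PySem.Dict.empty).items
      = d.keys.map (fun f => (f, ([] : List String))) := by
    have := PySem.Dict.items_foldl_insert_fresh d.keys (fun f => f) (fun _ => ([] : List String))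
      PySem.Dict.empty (fun a _ => PySem.Dict.contains_empty a) (by simpa using hnd)
    simpa using this
  have hkeys0 : (d.keys.foldl (fun r f => r.insert f ([] : List String)) PySem.Dict.empty).keys = d.keys := by
    show (d.keys.foldl (fun r f => r.insert f ([] : List String)) PySem.Dict.empty).items.map (fun x => x.1) = d.keys
    rw [hitems0, List.map_map]
    rw [show ((fun x : String × List String => x.1) ∘ (fun f : String => (f, ([] : List String)))) = id from rfl,
      List.map_id]
  have hg0 : ∀ k, (d.keys.foldl (fun r f => r.insert f ([] : List String)) PySem.Dict.empty).getD k []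
      = if k ∈ d.keys then pvDepsOf [] k else [] := by
    intro k
    by_cases hk : k ∈ d.keys
    · rw [PySem.Dict.getD_of_mem_items _ (by rw [hitems0]; exact List.mem_map_of_mem hk)
        (by rw [hkeys0]; exact hnd) []]
      rw [if_pos hk]
      rfl
    · rw [PySem.Dict.getD_of_not_contains _ _
        (by rw [← Bool.not_eq_true, pv_dcontains_eq, hkeys0, List.contains_iff_mem]; exact hk)]
      rw [if_neg hk]
  exact pv_revOuter d hnd d.items [] _ rfl hkeys0 hg0

theorem pv_bridgeB (d : PySem.Dict String (List String)) (hnd : d.keys.Nodup) :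
    ∀ (stack : List String) (comp : PySem.Set String), (∀ u ∈ stack, u ∈ d.keys) →
      pvB_dfs d (pvB_rev d) stack comp = pvDfsRef d.keys (pvNb d) stack comp := by
  intro stack comp
  induction stack, comp using pvB_dfs.induct d (pvB_rev d) with
  | case1 comp => intro _; rw [pvB_dfs, pvDfsRef]
  | case2 u rest comp h ih =>
    intro hsub
    rw [pvB_dfs, dif_pos h, pvDfsRef, dif_pos (by rw [h]; rfl)]
    exact ih (fun x hx => hsub x (List.mem_cons_of_mem _ hx))
  | case3 u rest comp h _nbrs ih =>
    intro hsub
    have huk : u ∈ d.keys := hsub u (List.mem_cons_self)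
    have hrev : (pvB_rev d).getD u [] = pvDeps d u := by
      rw [(pv_rev_spec d hnd).2 u, if_pos huk]
    rw [pvB_dfs, dif_neg h]
    rw [pvDfsRef, dif_neg (by
      rw [Bool.not_eq_true] at h
      rw [h, Bool.false_or, Bool.not_eq_true, Bool.not_eq_false', List.contains_iff_mem]
      exact huk)]
    have hnbrs : _nbrs = pvNb d u := by
      show List.filter (fun x => d.contains x) (d.getD u []) ++ (pvB_rev d).getD u [] = pvNb d u
      rw [hrev]
      rfl
    rw [hnbrs] at ih
    show pvB_dfs d (pvB_rev d) (_nbrs ++ rest) (PySem.Set.add comp u)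
      = pvDfsRef d.keys (pvNb d) (pvNb d u ++ rest) (PySem.Set.add comp u)
    rw [hnbrs]
    refine ih ?_
    intro x hx
    rcases List.mem_append.mp hx with hx | hx
    · rcases List.mem_append.mp hx with hx | hx
      · have := List.of_mem_filter hx
        exact (PySem.Dict.contains_iff_mem_keys d x).mp this
      · simp only [pvDeps, List.mem_map] at hx
        obtain ⟨q, hq, hqe⟩ := hx
        exact hqe ▸ PySem.Dict.mem_keys_of_mem_items _ (List.mem_of_mem_filter hq)
    · exact hsub x (List.mem_cons_of_mem _ hx)

-- ===== VERDICT (by name: the statement is the Claim_ definition above) =====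
theorem pv_top_eq (metadata : List (String × List String)) :
    group_related_functions_py metadata = group_related_functions_py_alt metadata := by
  unfold group_related_functions_py group_related_functions_py_alt
  have hnd : (PySem.Dict.ofList metadata).keys.Nodup := PySem.Dict.nodup_keys_ofList metadata
  set d := PySem.Dict.ofList metadata with hd
  apply congrArg Prod.fst
  apply PySem.List.foldl_congr_mem
  intro acc func hfunc
  by_cases hc : PySem.Set.contains acc.2 func = true
  · rw [if_neg (by rw [hc]; simp), if_pos hc]
  · rw [Bool.not_eq_true] at hc
    rw [if_pos (by rw [hc]; rfl), if_neg (by rw [hc]; simp)]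
    have hbr : pvA_getRelated d (d.items.length + 1) func PySem.Set.empty
        = pvB_dfs d (pvB_rev d) [func] PySem.Set.empty := by
      have hvA : pvA_getRelated d (d.items.length + 1) func PySem.Set.empty
          = pvDfsRef d.keys (pvNb d) [func] PySem.Set.empty := by
        apply pv_bridgeA
        · rw [PySem.Dict.contains_iff_mem_keys]; exact hfunc
        · rfl
        · have h1 : pvUnvis d PySem.Set.empty ≤ d.keys.length := List.length_filter_le _ _
          have h2 : d.keys.length = d.items.length := by
            show (d.items.map (·.1)).length = d.items.length
            rw [List.length_map]
          omega
      have hvB : pvB_dfs d (pvB_rev d) [func] PySem.Set.empty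
          = pvDfsRef d.keys (pvNb d) [func] PySem.Set.empty := by
        apply pv_bridgeB d hnd
        intro x hx
        rcases List.mem_singleton.mp hx with rfl
        exact hfunc
      rw [hvA, ← hvB]
    rw [hbr]

theorem group_related_functions_py_spec : Claim_equal_group_related_functions_py := by
  intro metadata _dom
  unfold Spec_group_related_functions_py
  exact pv_top_eq metadata
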